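-- pv_equiv track=rewrite | github.com/A-Korotin/algorithms_and_data_structures | 2 semester/lab4/lab4_2.py | count_palindrome_ways
-- ===== SOURCE A (Python) =====
-- def count_palindrome_ways(line):
--     palindrome_ways = 0
--     first, last = ord('a'), ord('z')
--     full, left = [], []
--     for i in range(first, last + 1):
--         full.append(0)
--         left.append(0)
--     for character in line:
--         numeric_val = ord(character)
--         full[numeric_val - first] += 1
--     for character in line:
--         numeric_val = ord(character) - first
--         left[numeric_val] += 1
--         for i in range(len(full)):
--             if i == numeric_val:
--                 right = full[i] - left[i]
--                 cur_left = left[i] - 1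
--                 palindrome_ways += cur_left * right
--             else:
--                 right = full[i] - left[i]
--                 palindrome_ways += left[i] * right
--     return palindrome_ways
-- ===== SOURCE B (Python) =====
-- def count_palindrome_ways(line):
--     count = [0] * 26
--     pos_sum = [0] * 26
--     total = 0
--     for k, character in enumerate(line):
--         b = ord(character) - ord('a')
--         total += count[b] * (k - 1) - pos_sum[b]
--         count[b] += 1
--         pos_sum[b] += k
--     return total
-- ===== Notes on version B (the rewrite author's own statement) =====
-- stated objective: faster
-- what changed: Instead of a full-count pass plus a 26-bucket inner loop per character, B does one pass over equal-endpoint pairs: per-bucket running count and position-sum arrays let each position k add count[b]*(k-1)-pos_sum[b] (the k-i-1 middles over all earlier equal-bucket i) in O(1).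
-- intended difference: On strings where a character with code 71-96 ('G'..'`', bucketed onto 'a'..'z' by Python's negative-index wraparound) is followed by a later character of the same bucket, A returns a count inflated by the number of such pairs (its `i == numeric_val` self-exclusion never fires for a negative index), while B returns the consistent sum of (k-i-1) over equal-bucket pairs, the intended palindrome-middle count. — e.g. on count_palindrome_ways("GG"): A returns 1, B returns 0
import Mathlib
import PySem

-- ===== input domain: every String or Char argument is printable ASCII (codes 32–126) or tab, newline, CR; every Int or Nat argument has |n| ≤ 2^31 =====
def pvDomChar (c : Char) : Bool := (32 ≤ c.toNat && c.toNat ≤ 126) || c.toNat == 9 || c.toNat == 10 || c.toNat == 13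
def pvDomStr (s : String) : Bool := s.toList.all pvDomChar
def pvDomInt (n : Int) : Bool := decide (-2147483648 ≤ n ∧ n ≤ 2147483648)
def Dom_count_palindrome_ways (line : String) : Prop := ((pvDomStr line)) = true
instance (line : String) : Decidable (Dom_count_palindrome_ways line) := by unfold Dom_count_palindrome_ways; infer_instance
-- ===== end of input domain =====

-- B replaces A's 26-bucket inner loop by a single pass with per-bucket running
-- count and position sums (objective: faster, constant-factor: drops the 26× inner loop);
-- on strings containing characters 'G'..'`' A's self-pair exclusion misfires (see D_ below).

-- ===== PORT A =====
def count_palindrome_ways (line : String) : Int :=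
  let palindrome_ways : Int := 0
  let first : Int := 97
  let last : Int := 122
  let fl := (PySem.List.pyRange first (last + 1) 1).foldl
      (fun (p : List Int × List Int) _ => (p.1 ++ [(0 : Int)], p.2 ++ [(0 : Int)])) ([], [])
  let full := line.toList.foldl
      (fun (full : List Int) character =>
        let numeric_val : Int := (character.toNat : Int)
        PySem.List.pySetD full (numeric_val - first)
          (PySem.List.pyGetD full (numeric_val - first) 0 + 1)) fl.1
  let st := line.toList.foldl
      (fun (st : List Int × Int) character =>
        let numeric_val : Int := (character.toNat : Int) - first
        let left := PySem.List.pySetD st.1 numeric_val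
          (PySem.List.pyGetD st.1 numeric_val 0 + 1)
        let pw := (PySem.List.pyRange 0 ((full.length : Int)) 1).foldl
          (fun (acc : Int) i =>
            if i = numeric_val then
              let right := PySem.List.pyGetD full i 0 - PySem.List.pyGetD left i 0
              let cur_left := PySem.List.pyGetD left i 0 - 1
              acc + cur_left * right
            else
              let right := PySem.List.pyGetD full i 0 - PySem.List.pyGetD left i 0
              acc + PySem.List.pyGetD left i 0 * right)
          st.2
        (left, pw))
      (fl.2, palindrome_ways)
  st.2

-- ===== PORT B =====
def count_palindrome_ways_alt (line : String) : Int :=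
  let st := (PySem.List.enumerate line.toList 0).foldl
    (fun (st : List Int × List Int × Int) kc =>
      let b : Int := ((kc.2.toNat : Int)) - 97
      let total := st.2.2 + PySem.List.pyGetD st.1 b 0 * (kc.1 - 1) - PySem.List.pyGetD st.2.1 b 0
      (PySem.List.pySetD st.1 b (PySem.List.pyGetD st.1 b 0 + 1),
       PySem.List.pySetD st.2.1 b (PySem.List.pyGetD st.2.1 b 0 + kc.1),
       total))
    (List.replicate 26 (0 : Int), List.replicate 26 (0 : Int), 0)
  st.2.2

-- ===== PRECONDITION & SPEC =====
-- Pre_ admits exactly the inputs on which the Python A returns normally: a character with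
-- code < 71 or > 122 makes A's list index  ord(c)-97  fall outside [-26, 25] → IndexError.
def Pre_count_palindrome_ways (line : String) : Prop :=
  (line.toList.all (fun c => 71 ≤ c.toNat && c.toNat ≤ 122)) = true
instance (line : String) : Decidable (Pre_count_palindrome_ways line) := by
  unfold Pre_count_palindrome_ways; infer_instance
def pvWitness_count_palindrome_ways : String := ("abcba")

-- the effective 26-letter bucket both programs index: chars 'a'..'z' directly,
-- chars 'G'..'`' through Python's negative-index wraparound
def pvSlot (c : Char) : Nat := if 97 ≤ c.toNat then c.toNat - 97 else c.toNat - 71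

-- On strings where some character with code 71–96 ('G'..'`') is followed by a later character of
-- the same wrapped bucket, A returns a count inflated by the number of such pairs (its
-- `i == numeric_val` self-exclusion never fires for a negative index), while B returns the
-- consistent middles count sum of (k-i-1) over equal-bucket pairs, the intended value.
-- one linear scan: per bucket, has a character with code ≤ 96 been seen; found once a
-- character's bucket was already marked
def pvWrapStep (st : List Bool × Bool) (d : Char) : List Bool × Bool :=
  (if d.toNat ≤ 96 then st.1.set (pvSlot d) true else st.1,
   st.2 || st.1.getD (pvSlot d) false)

def D_count_palindrome_ways (line : String) : Prop :=
  (line.toList.foldl pvWrapStep (List.replicate 26 false, false)).2 = true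
instance (line : String) : Decidable (D_count_palindrome_ways line) := by
  unfold D_count_palindrome_ways; infer_instance

def Spec_count_palindrome_ways (line : String) (out : Int) : Prop :=
  ¬ D_count_palindrome_ways line → out = count_palindrome_ways_alt line
instance (line : String) (out : Int) : Decidable (Spec_count_palindrome_ways line out) := by
  unfold Spec_count_palindrome_ways; infer_instance

def pvDiffWitness_count_palindrome_ways : String := ("GG")
def pvDiffWitnessOut_count_palindrome_ways : Int × Int := (1, 0)

-- ===== CLAIM (what is proved, stated in full; the proofs are below) =====
def Claim_unchanged_count_palindrome_ways : Prop := ∀ (line : String), Dom_count_palindrome_ways line → Pre_count_palindrome_ways line → Spec_count_palindrome_ways line (count_palindrome_ways line)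
def Claim_changed_count_palindrome_ways : Prop := Dom_count_palindrome_ways (pvDiffWitness_count_palindrome_ways) ∧ Pre_count_palindrome_ways (pvDiffWitness_count_palindrome_ways) ∧ D_count_palindrome_ways (pvDiffWitness_count_palindrome_ways) ∧ count_palindrome_ways (pvDiffWitness_count_palindrome_ways) = pvDiffWitnessOut_count_palindrome_ways.1 ∧ count_palindrome_ways_alt (pvDiffWitness_count_palindrome_ways) = pvDiffWitnessOut_count_palindrome_ways.2 ∧ pvDiffWitnessOut_count_palindrome_ways.1 ≠ pvDiffWitnessOut_count_palindrome_ways.2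
def Claim_exact_count_palindrome_ways : Prop := ∀ (line : String), Dom_count_palindrome_ways line → Pre_count_palindrome_ways line → D_count_palindrome_ways line → count_palindrome_ways line ≠ count_palindrome_ways_alt line

-- ===== LEMMAS AND PROOFS =====

-- recursive form of the D_ scan, for the proofs
def pvHasWrappedPair : List Char → Bool
  | [] => false
  | c :: r => (decide (c.toNat ≤ 96) && r.any (fun d => pvSlot d == pvSlot c))
      || pvHasWrappedPair r

lemma pv_pre_forall (line : String) (h : Pre_count_palindrome_ways line) :
    ∀ c ∈ line.toList, 71 ≤ c.toNat ∧ c.toNat ≤ 122 := by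
  intro c hc
  have := List.all_eq_true.mp h c hc
  simpa using this

-- number of characters of r falling in bucket i
def pvOcc (r : List Char) (i : Nat) : Int := (r.countP (fun c => pvSlot c = i) : Int)

-- A's inner 26-bucket sum
def pvSI (full left : List Int) : Int :=
  ∑ i ∈ Finset.range 26, left.getD i 0 * (full.getD i 0 - left.getD i 0)

-- clean (slot-indexed) forms of the two loop bodies
def pvStepA (full : List Int) (st : List Int × Int) (c : Char) : List Int × Int :=
  let s := pvSlot c
  let left := st.1.set s (st.1.getD s 0 + 1)
  (left, st.2 + pvSI full left - (if 97 ≤ c.toNat then full.getD s 0 - left.getD s 0 else 0))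

def pvStepB (st : List Int × List Int × Int) (kc : Int × Char) : List Int × List Int × Int :=
  let s := pvSlot kc.2
  (st.1.set s (st.1.getD s 0 + 1), st.2.1.set s (st.2.1.getD s 0 + kc.1),
   st.2.2 + st.1.getD s 0 * (kc.1 - 1) - st.2.1.getD s 0)

-- correction term: what A's accumulator is ahead of B's, as a function of B's state and the rest
def pvC (r : List Char) (count possum wcount : List Int) (k : Int) : Int :=
  (r.map (fun d => count.getD (pvSlot d) 0 * (k - 1) - possum.getD (pvSlot d) 0
                    + wcount.getD (pvSlot d) 0)).sum

-- total surplus A accrues: wcount = wrapped chars seen so far per bucket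
def pvP (r : List Char) (wcount : List Int) : Int :=
  match r with
  | [] => 0
  | c :: r =>
    wcount.getD (pvSlot c) 0 +
      pvP r (if c.toNat ≤ 96 then wcount.set (pvSlot c) (wcount.getD (pvSlot c) 0 + 1) else wcount)

-- number of pairs i<j with cs[i] wrapped ('G'..'`') and equal bucket
def pvPC (cs : List Char) : Int :=
  match cs with
  | [] => 0
  | c :: r => (if c.toNat ≤ 96 then pvOcc r (pvSlot c) else 0) + pvPC r

lemma pv_getD_set' {α : Type} (l : List α) (s t : Nat) (v dflt : α) (h : s < l.length) :
    (l.set s v).getD t dflt = if t = s then v else l.getD t dflt := by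
  rcases Nat.lt_or_ge t l.length with ht | ht
  · rw [List.getD_eq_getElem _ _ (by simpa using ht), List.getD_eq_getElem _ _ ht, List.getElem_set]
    simp [eq_comm]
  · rw [List.getD_eq_default _ _ (by simpa using ht), List.getD_eq_default _ _ ht]
    simp; omega

lemma pv_getD_set (l : List Int) (s t : Nat) (v : Int) (h : s < l.length) :
    (l.set s v).getD t 0 = if t = s then v else l.getD t 0 :=
  pv_getD_set' l s t v 0 h

lemma pvSlot_lt (c : Char) (h1 : 71 ≤ c.toNat) (h2 : c.toNat ≤ 122) : pvSlot c < 26 := by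
  unfold pvSlot; split <;> omega

lemma pv_bridge_get (l : List Int) (c : Char) (d : Int) (hlen : l.length = 26)
    (h1 : 71 ≤ c.toNat) (h2 : c.toNat ≤ 122) :
    PySem.List.pyGetD l ((c.toNat : Int) - 97) d = l.getD (pvSlot c) d := by
  unfold pvSlot
  by_cases h : 97 ≤ c.toNat
  · rw [if_pos h, PySem.List.pyGetD_eq_getElem l d (by omega) (by omega)]
    rw [List.getD_eq_getElem l d (by omega)]
    congr 1
    omega
  · rw [if_neg h]
    have hk : ((c.toNat : Int) - 97) = -((97 - c.toNat : Nat) : Int) := by omega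
    rw [hk, PySem.List.pyGetD_neg_natCast l (97 - c.toNat) d (by omega) (by omega)]
    rw [List.getD_eq_getElem l d (by omega)]
    congr 1
    omega

lemma pv_bridge_set (l : List Int) (c : Char) (v : Int) (hlen : l.length = 26)
    (h1 : 71 ≤ c.toNat) (h2 : c.toNat ≤ 122) :
    PySem.List.pySetD l ((c.toNat : Int) - 97) v = l.set (pvSlot c) v := by
  unfold pvSlot
  by_cases h : 97 ≤ c.toNat
  · rw [if_pos h, PySem.List.pySetD_of_nonneg l v (by omega)]
    congr 1
    omega
  · rw [if_neg h]
    have hk : ((c.toNat : Int) - 97) = -((97 - c.toNat : Nat) : Int) := by omega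
    rw [hk]
    -- Python's negative-index assignment full[i] = v for -len ≤ i < 0: ported exactly,
    -- set at position len - |i|
    unfold PySem.List.pySetD PySem.List.pySet? PySem.List.pyIdx?
    rw [if_neg (by omega), if_pos (by omega)]
    simp only [Option.map_some, Option.getD_some, neg_neg, Int.toNat_natCast]
    congr 1
    omega

lemma pvOcc_cons (c : Char) (r : List Char) (i : Nat) :
    pvOcc (c :: r) i = pvOcc r i + (if pvSlot c = i then 1 else 0) := by
  simp only [pvOcc, List.countP_cons]
  by_cases h : pvSlot c = i <;> simp [h]

lemma pvOcc_cons' (c : Char) (r : List Char) (i : Nat) :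
    pvOcc (c :: r) i = pvOcc r i + (if i = pvSlot c then 1 else 0) := by
  rw [pvOcc_cons]
  congr 1
  by_cases h : pvSlot c = i
  · rw [if_pos h, if_pos h.symm]
  · rw [if_neg h, if_neg (fun hh => h hh.symm)]

lemma pvOcc_nonneg (r : List Char) (i : Nat) : 0 ≤ pvOcc r i := by
  simp [pvOcc]

lemma pv_sum_set (r : List Char) (l : List Int) (s : Nat) (v : Int) (h : s < l.length) :
    (r.map (fun d => (l.set s v).getD (pvSlot d) 0)).sum
      = (r.map (fun d => l.getD (pvSlot d) 0)).sum + (v - l.getD s 0) * pvOcc r s := by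
  induction r with
  | nil => simp [pvOcc]
  | cons d r ih =>
    simp only [List.map_cons, List.sum_cons, ih, pvOcc_cons]
    rw [pv_getD_set _ _ _ _ h]
    by_cases hds : pvSlot d = s
    · rw [if_pos hds, if_pos hds, hds]; ring
    · rw [if_neg hds, if_neg hds]; ring

lemma pv_sum_mul_occ (f : Nat → Int) (r : List Char) (hr : ∀ d ∈ r, pvSlot d < 26) :
    ∑ i ∈ Finset.range 26, f i * pvOcc r i = (r.map (fun d => f (pvSlot d))).sum := by
  induction r with
  | nil => simp [pvOcc]
  | cons d r ih =>
    have hd : pvSlot d ∈ Finset.range 26 := by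
      simpa using hr d (by simp)
    simp only [pvOcc_cons, mul_add, Finset.sum_add_distrib, List.map_cons, List.sum_cons,
      ih (fun x hx => hr x (by simp [hx]))]
    rw [Finset.sum_congr rfl (fun i _ => by rw [mul_ite, mul_one, mul_zero]),
      Finset.sum_ite_eq (Finset.range 26) (pvSlot d) f]
    rw [if_pos hd]; ring

lemma pv_C_step (r : List Char) (count possum wcount : List Int) (k : Int) (c : Char)
    (hc : count.length = 26) (hp : possum.length = 26) (hw : wcount.length = 26)
    (hcr : 71 ≤ c.toNat) (hcr2 : c.toNat ≤ 122) :
    pvC r (count.set (pvSlot c) (count.getD (pvSlot c) 0 + 1))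
          (possum.set (pvSlot c) (possum.getD (pvSlot c) 0 + k))
          (if c.toNat ≤ 96 then wcount.set (pvSlot c) (wcount.getD (pvSlot c) 0 + 1) else wcount)
          (k + 1)
      = pvC r count possum wcount k + (r.map (fun d => count.getD (pvSlot d) 0)).sum
          + (if c.toNat ≤ 96 then pvOcc r (pvSlot c) else 0) := by
  have hs : pvSlot c < 26 := pvSlot_lt c hcr hcr2
  induction r with
  | nil => simp [pvC, pvOcc]
  | cons d r ih =>
    simp only [pvC, List.map_cons, List.sum_cons] at ih ⊢
    rw [pv_getD_set count _ _ _ (by omega), pv_getD_set possum _ _ _ (by omega)]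
    by_cases hw : c.toNat ≤ 96
    · simp only [if_pos hw] at ih ⊢
      rw [pv_getD_set wcount _ _ _ (by omega), pvOcc_cons]
      by_cases hds : pvSlot d = pvSlot c
      · simp only [hds, reduceIte]
        linear_combination ih
      · simp only [if_neg hds]
        linear_combination ih
    · simp only [if_neg hw] at ih ⊢
      by_cases hds : pvSlot d = pvSlot c
      · simp only [hds, reduceIte]
        linear_combination ih
      · simp only [if_neg hds]
        linear_combination ih

lemma pv_stepA_acc (full : List Int) (r : List Char) (l : List Int) (a x : Int) :
    r.foldl (pvStepA full) (l, a + x)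
      = ((r.foldl (pvStepA full) (l, a)).1, (r.foldl (pvStepA full) (l, a)).2 + x) := by
  induction r generalizing l a with
  | nil => rfl
  | cons c r ih =>
    simp only [List.foldl_cons, pvStepA]
    rw [show a + x + pvSI full (l.set (pvSlot c) (l.getD (pvSlot c) 0 + 1)) -
          (if 97 ≤ c.toNat then full.getD (pvSlot c) 0
            - (l.set (pvSlot c) (l.getD (pvSlot c) 0 + 1)).getD (pvSlot c) 0 else 0)
        = (a + pvSI full (l.set (pvSlot c) (l.getD (pvSlot c) 0 + 1)) -
          (if 97 ≤ c.toNat then full.getD (pvSlot c) 0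
            - (l.set (pvSlot c) (l.getD (pvSlot c) 0 + 1)).getD (pvSlot c) 0 else 0)) + x
        from by ring, ih]

lemma pv_inner (full left : List Int) (c : Char) (acc : Int)
    (hf : full.length = 26)
    (h1 : 71 ≤ c.toNat) (h2 : c.toNat ≤ 122) :
    (PySem.List.pyRange 0 ((full.length : Int)) 1).foldl
      (fun (acc : Int) i =>
        if i = (c.toNat : Int) - 97 then
          let right := PySem.List.pyGetD full i 0 - PySem.List.pyGetD left i 0
          let cur_left := PySem.List.pyGetD left i 0 - 1
          acc + cur_left * right
        else
          let right := PySem.List.pyGetD full i 0 - PySem.List.pyGetD left i 0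
          acc + PySem.List.pyGetD left i 0 * right) acc
    = acc + pvSI full left
        - (if 97 ≤ c.toNat then full.getD (pvSlot c) 0 - left.getD (pvSlot c) 0 else 0) := by
  rw [hf, PySem.List.pyRange_zero_natCast 26, List.foldl_map]
  have hbody : (fun (acc : Int) (x : Nat) =>
      if (x : Int) = (c.toNat : Int) - 97 then
        let right := PySem.List.pyGetD full (x : Int) 0 - PySem.List.pyGetD left (x : Int) 0
        let cur_left := PySem.List.pyGetD left (x : Int) 0 - 1
        acc + cur_left * right
      else
        let right := PySem.List.pyGetD full (x : Int) 0 - PySem.List.pyGetD left (x : Int) 0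
        acc + PySem.List.pyGetD left (x : Int) 0 * right)
    = (fun (acc : Int) (x : Nat) => acc +
        (left.getD x 0 * (full.getD x 0 - left.getD x 0)
          - if (x : Int) = (c.toNat : Int) - 97 then full.getD x 0 - left.getD x 0 else 0)) := by
    funext acc x
    simp only [PySem.List.pyGetD_natCast]
    split <;> ring
  rw [hbody, PySem.List.foldl_add]
  have hsum : ((List.range 26).map (fun x : Nat =>
      left.getD x 0 * (full.getD x 0 - left.getD x 0)
        - if (x : Int) = (c.toNat : Int) - 97 then full.getD x 0 - left.getD x 0 else 0)).sum
      = (∑ i ∈ Finset.range 26, (left.getD i 0 * (full.getD i 0 - left.getD i 0)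
          - if (i : Int) = (c.toNat : Int) - 97 then full.getD i 0 - left.getD i 0 else 0)) := rfl
  rw [hsum, Finset.sum_sub_distrib]
  have hsub : (∑ i ∈ Finset.range 26,
      if (i : Int) = (c.toNat : Int) - 97 then full.getD i 0 - left.getD i 0 else 0)
      = (if 97 ≤ c.toNat then full.getD (pvSlot c) 0 - left.getD (pvSlot c) 0 else 0) := by
    by_cases h97 : 97 ≤ c.toNat
    · rw [if_pos h97]
      have hcond : ∀ i ∈ Finset.range 26,
          (if (i : Int) = (c.toNat : Int) - 97 then full.getD i 0 - left.getD i 0 else 0)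
            = (if i = pvSlot c then full.getD i 0 - left.getD i 0 else 0) := by
        intro i _
        have : ((i : Int) = (c.toNat : Int) - 97) ↔ (i = pvSlot c) := by
          unfold pvSlot; rw [if_pos h97]; omega
        by_cases hi : i = pvSlot c
        · rw [if_pos (this.mpr hi), if_pos hi, hi]
        · rw [if_neg (fun hh => hi (this.mp hh)), if_neg hi]
      rw [Finset.sum_congr rfl hcond,
        Finset.sum_ite_eq' (Finset.range 26) (pvSlot c) (fun i => full.getD i 0 - left.getD i 0)]
      rw [if_pos (by simpa using pvSlot_lt c h1 h2)]
    · rw [if_neg h97]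
      refine Finset.sum_eq_zero (fun i _ => ?_)
      rw [if_neg (by omega)]
  rw [hsub, pvSI]
  ring

lemma pv_foldA (full : List Int) (hf : full.length = 26) (cs : List Char)
    (hcs : ∀ c ∈ cs, 71 ≤ c.toNat ∧ c.toNat ≤ 122) :
    ∀ (st : List Int × Int), st.1.length = 26 →
    cs.foldl
      (fun (st : List Int × Int) character =>
        let numeric_val : Int := (character.toNat : Int) - 97
        let left := PySem.List.pySetD st.1 numeric_val
          (PySem.List.pyGetD st.1 numeric_val 0 + 1)
        let pw := (PySem.List.pyRange 0 ((full.length : Int)) 1).foldl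
          (fun (acc : Int) i =>
            if i = numeric_val then
              let right := PySem.List.pyGetD full i 0 - PySem.List.pyGetD left i 0
              let cur_left := PySem.List.pyGetD left i 0 - 1
              acc + cur_left * right
            else
              let right := PySem.List.pyGetD full i 0 - PySem.List.pyGetD left i 0
              acc + PySem.List.pyGetD left i 0 * right)
          st.2
        (left, pw)) st
      = cs.foldl (pvStepA full) st := by
  induction cs with
  | nil => intro st _; rfl
  | cons c r ih =>
    intro st hst
    obtain ⟨h1, h2⟩ := hcs c (by simp)
    simp only [List.foldl_cons]
    have hstep : (let numeric_val : Int := (c.toNat : Int) - 97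
        let left := PySem.List.pySetD st.1 numeric_val
          (PySem.List.pyGetD st.1 numeric_val 0 + 1)
        let pw := (PySem.List.pyRange 0 ((full.length : Int)) 1).foldl
          (fun (acc : Int) i =>
            if i = numeric_val then
              let right := PySem.List.pyGetD full i 0 - PySem.List.pyGetD left i 0
              let cur_left := PySem.List.pyGetD left i 0 - 1
              acc + cur_left * right
            else
              let right := PySem.List.pyGetD full i 0 - PySem.List.pyGetD left i 0
              acc + PySem.List.pyGetD left i 0 * right)
          st.2
        ((left, pw) : List Int × Int))
        = pvStepA full st c := by
      show (PySem.List.pySetD st.1 ((c.toNat : Int) - 97)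
          (PySem.List.pyGetD st.1 ((c.toNat : Int) - 97) 0 + 1),
        (PySem.List.pyRange 0 ((full.length : Int)) 1).foldl _ st.2) = _
      rw [pv_bridge_get st.1 c 0 hst h1 h2, pv_bridge_set st.1 c _ hst h1 h2,
        pv_inner full (st.1.set (pvSlot c) (st.1.getD (pvSlot c) 0 + 1)) c st.2 hf h1 h2]
      rfl
    rw [hstep]
    exact ih (fun x hx => hcs x (by simp [hx])) (pvStepA full st c)
      (by simp [pvStepA, hst])

lemma pv_foldB (cs : List Char) (hcs : ∀ c ∈ cs, 71 ≤ c.toNat ∧ c.toNat ≤ 122) :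
    ∀ (k : Int) (st : List Int × List Int × Int), st.1.length = 26 → st.2.1.length = 26 →
    (PySem.List.enumerate cs k).foldl
      (fun (st : List Int × List Int × Int) kc =>
        let b : Int := ((kc.2.toNat : Int)) - 97
        let total := st.2.2 + PySem.List.pyGetD st.1 b 0 * (kc.1 - 1) - PySem.List.pyGetD st.2.1 b 0
        (PySem.List.pySetD st.1 b (PySem.List.pyGetD st.1 b 0 + 1),
         PySem.List.pySetD st.2.1 b (PySem.List.pyGetD st.2.1 b 0 + kc.1),
         total)) st
      = (PySem.List.enumerate cs k).foldl pvStepB st := by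
  induction cs with
  | nil => intro k st _ _; rfl
  | cons c r ih =>
    intro k st hst1 hst2
    obtain ⟨h1, h2⟩ := hcs c (by simp)
    rw [PySem.List.enumerate_cons]
    simp only [List.foldl_cons]
    have hstep : (let b : Int := ((c.toNat : Int)) - 97
        let total := st.2.2 + PySem.List.pyGetD st.1 b 0 * (k - 1) - PySem.List.pyGetD st.2.1 b 0
        ((PySem.List.pySetD st.1 b (PySem.List.pyGetD st.1 b 0 + 1),
         PySem.List.pySetD st.2.1 b (PySem.List.pyGetD st.2.1 b 0 + k),
         total) : List Int × List Int × Int))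
        = pvStepB st (k, c) := by
      rw [show (let b : Int := ((c.toNat : Int)) - 97
        let total := st.2.2 + PySem.List.pyGetD st.1 b 0 * (k - 1) - PySem.List.pyGetD st.2.1 b 0
        ((PySem.List.pySetD st.1 b (PySem.List.pyGetD st.1 b 0 + 1),
         PySem.List.pySetD st.2.1 b (PySem.List.pyGetD st.2.1 b 0 + k),
         total) : List Int × List Int × Int))
        = (PySem.List.pySetD st.1 ((c.toNat : Int) - 97) (PySem.List.pyGetD st.1 ((c.toNat : Int) - 97) 0 + 1),
           PySem.List.pySetD st.2.1 ((c.toNat : Int) - 97) (PySem.List.pyGetD st.2.1 ((c.toNat : Int) - 97) 0 + k),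
           st.2.2 + PySem.List.pyGetD st.1 ((c.toNat : Int) - 97) 0 * (k - 1)
             - PySem.List.pyGetD st.2.1 ((c.toNat : Int) - 97) 0) from rfl]
      rw [pv_bridge_get st.1 c 0 hst1 h1 h2, pv_bridge_set st.1 c _ hst1 h1 h2,
        pv_bridge_get st.2.1 c 0 hst2 h1 h2, pv_bridge_set st.2.1 c _ hst2 h1 h2]
      rfl
    rw [hstep]
    exact ih (fun x hx => hcs x (by simp [hx])) (k + 1) (pvStepB st (k, c))
      (by simp [pvStepB, hst1]) (by simp [pvStepB, hst2])

lemma pv_full_loop (cs : List Char) (hcs : ∀ c ∈ cs, 71 ≤ c.toNat ∧ c.toNat ≤ 122) :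
    ∀ (f : List Int), f.length = 26 →
      (cs.foldl
        (fun (full : List Int) character =>
          PySem.List.pySetD full ((character.toNat : Int) - 97)
            (PySem.List.pyGetD full ((character.toNat : Int) - 97) 0 + 1)) f).length = 26
      ∧ ∀ i, i < 26 →
        (cs.foldl
          (fun (full : List Int) character =>
            PySem.List.pySetD full ((character.toNat : Int) - 97)
              (PySem.List.pyGetD full ((character.toNat : Int) - 97) 0 + 1)) f).getD i 0
          = f.getD i 0 + pvOcc cs i := by
  induction cs with
  | nil => intro f hf; exact ⟨hf, by simp [pvOcc]⟩
  | cons c r ih =>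
    intro f hf
    obtain ⟨h1, h2⟩ := hcs c (by simp)
    have hs : pvSlot c < 26 := pvSlot_lt c h1 h2
    simp only [List.foldl_cons]
    rw [pv_bridge_get f c 0 hf h1 h2, pv_bridge_set f c _ hf h1 h2]
    obtain ⟨ihl, ihv⟩ := ih (fun x hx => hcs x (by simp [hx]))
      (f.set (pvSlot c) (f.getD (pvSlot c) 0 + 1)) (by simp [hf])
    refine ⟨ihl, fun i hi => ?_⟩
    rw [ihv i hi, pv_getD_set f _ _ _ (by omega), pvOcc_cons']
    by_cases hds : i = pvSlot c
    · rw [if_pos hds, if_pos hds, hds]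
      ring
    · rw [if_neg hds, if_neg hds]
      ring

lemma pv_main (full : List Int) :
    ∀ (rest : List Char), (∀ c ∈ rest, 71 ≤ c.toNat ∧ c.toNat ≤ 122) →
    ∀ (count possum wcount : List Int) (k accB : Int),
      count.length = 26 → possum.length = 26 → wcount.length = 26 →
      (∀ i, i < 26 → full.getD i 0 = count.getD i 0 + pvOcc rest i) →
      (rest.foldl (pvStepA full) (count, accB + pvC rest count possum wcount k)).2
        = ((PySem.List.enumerate rest k).foldl pvStepB (count, possum, accB)).2.2
            + pvP rest wcount := by
  intro rest
  induction rest with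
  | nil =>
    intro _ count possum wcount k accB _ _ _ _
    simp [pvC, pvP, PySem.List.enumerate]
  | cons c r ih =>
    intro hchars count possum wcount k accB hc hp hw hfull
    obtain ⟨h1, h2⟩ := hchars c (by simp)
    have hs : pvSlot c < 26 := pvSlot_lt c h1 h2
    have hchars' : ∀ x ∈ r, 71 ≤ x.toNat ∧ x.toNat ≤ 122 := fun x hx => hchars x (by simp [hx])
    have hslots : ∀ d ∈ r, pvSlot d < 26 := fun d hd =>
      pvSlot_lt d (hchars' d hd).1 (hchars' d hd).2
    -- abbreviations
    set s := pvSlot c with hsdef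
    set count' := count.set s (count.getD s 0 + 1) with hcdef
    set possum' := possum.set s (possum.getD s 0 + k) with hpdef
    set wcount' := (if c.toNat ≤ 96 then wcount.set s (wcount.getD s 0 + 1) else wcount) with hwdef
    set cB := count.getD s 0 * (k - 1) - possum.getD s 0 with hcBdef
    -- the updated full-vs-count invariant
    have e3a : ∀ i, i < 26 → full.getD i 0 - count'.getD i 0 = pvOcc r i := by
      intro i hi
      rw [hfull i hi, hcdef, pv_getD_set count _ _ _ (by omega), pvOcc_cons']
      by_cases hds : i = s
      · rw [if_pos hds, if_pos (hsdef ▸ hds), hds]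
        omega
      · rw [if_neg hds, if_neg (fun hh => hds (hsdef ▸ hh))]
        omega
    have hfull' : ∀ i, i < 26 → full.getD i 0 = count'.getD i 0 + pvOcc r i := by
      intro i hi; have := e3a i hi; omega
    -- A's inner sum over the new left array, as a sum over the remaining characters
    have e3 : pvSI full count' = (r.map (fun d => count.getD (pvSlot d) 0)).sum + pvOcc r s := by
      have e3b : pvSI full count' = ∑ i ∈ Finset.range 26, count'.getD i 0 * pvOcc r i := by
        refine Finset.sum_congr rfl (fun i hi => ?_)
        rw [e3a i (by simpa using hi)]
      rw [e3b, pv_sum_mul_occ (fun i => count'.getD i 0) r hslots, hcdef,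
        pv_sum_set r count s _ (by omega)]
      ring
    -- LHS step
    rw [List.foldl_cons]
    have hstepA : pvStepA full (count, accB + pvC (c :: r) count possum wcount k) c
        = (count', accB + cB + pvC r count' possum' wcount' (k + 1) + wcount.getD s 0) := by
      simp only [pvStepA, ← hsdef, ← hcdef]
      refine Prod.ext_iff.mpr ⟨rfl, ?_⟩
      simp only []
      rw [e3, pv_C_step r count possum wcount k c hc hp hw h1 h2]
      have hC : pvC (c :: r) count possum wcount k
          = cB + wcount.getD s 0 + pvC r count possum wcount k := by
        simp only [pvC, List.map_cons, List.sum_cons, hcBdef]; ring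
      rw [hC]
      have hset : count'.getD s 0 = count.getD s 0 + 1 := by
        rw [hcdef, pv_getD_set count _ _ _ (by omega), if_pos rfl]
      by_cases h97 : 97 ≤ c.toNat
      · rw [if_pos h97, if_neg (by omega : ¬ c.toNat ≤ 96),
          show full.getD s 0 - count'.getD s 0 = pvOcc r s from e3a s (by omega)]
        ring
      · rw [if_neg h97, if_pos (by omega : c.toNat ≤ 96)]
        ring
    rw [hstepA]
    rw [show accB + cB + pvC r count' possum' wcount' (k + 1) + wcount.getD s 0
        = (accB + cB + pvC r count' possum' wcount' (k + 1)) + wcount.getD s 0 from by ring,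
      pv_stepA_acc]
    rw [ih hchars' count' possum' wcount' (k + 1) (accB + cB)
      (by rw [hcdef]; simp [hc]) (by rw [hpdef]; simp [hp])
      (by rw [hwdef]; split <;> simp [hw]) hfull']
    -- RHS step
    rw [PySem.List.enumerate_cons, List.foldl_cons]
    have hstepB : pvStepB (count, possum, accB) (k, c) = (count', possum', accB + cB) := by
      simp only [pvStepB, ← hsdef, ← hcdef, ← hpdef, hcBdef]
      refine Prod.ext_iff.mpr ⟨rfl, Prod.ext_iff.mpr ⟨rfl, ?_⟩⟩
      simp only []
      ring
    rw [hstepB]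
    have hP : pvP (c :: r) wcount = wcount.getD s 0 + pvP r wcount' := by
      simp only [pvP, ← hsdef, ← hwdef]
    rw [hP]
    ring

lemma pvP_eq (cs : List Char) (hcs : ∀ c ∈ cs, 71 ≤ c.toNat ∧ c.toNat ≤ 122) :
    ∀ (w : List Int), w.length = 26 →
      pvP cs w = (cs.map (fun d => w.getD (pvSlot d) 0)).sum + pvPC cs := by
  induction cs with
  | nil => intro w _; simp [pvP, pvPC]
  | cons c r ih =>
    intro w hlen
    obtain ⟨h1, h2⟩ := hcs c (by simp)
    have hs : pvSlot c < 26 := pvSlot_lt c h1 h2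
    have hcs' : ∀ x ∈ r, 71 ≤ x.toNat ∧ x.toNat ≤ 122 := fun x hx => hcs x (by simp [hx])
    simp only [pvP, pvPC, List.map_cons, List.sum_cons]
    by_cases hw : c.toNat ≤ 96
    · rw [if_pos hw, if_pos hw, ih hcs' _ (by simp [hlen]),
        pv_sum_set r w (pvSlot c) _ (by omega)]
      ring
    · rw [if_neg hw, if_neg hw, ih hcs' w hlen]
      ring

lemma pvPC_nonneg (cs : List Char) : 0 ≤ pvPC cs := by
  induction cs with
  | nil => simp [pvPC]
  | cons c r ih =>
    have := pvOcc_nonneg r (pvSlot c)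
    simp only [pvPC]; split <;> omega

lemma pvPC_eq_zero_iff (cs : List Char) :
    pvPC cs = 0 ↔ cs.Pairwise (fun a b => ¬ (a.toNat ≤ 96 ∧ pvSlot a = pvSlot b)) := by
  induction cs with
  | nil => simp [pvPC]
  | cons c r ih =>
    have h1 := pvPC_nonneg r
    have h2 : (0:Int) ≤ (if c.toNat ≤ 96 then pvOcc r (pvSlot c) else 0) := by
      split
      · exact pvOcc_nonneg _ _
      · exact le_refl 0
    constructor
    · intro h
      simp only [pvPC] at h
      have hz : (if c.toNat ≤ 96 then pvOcc r (pvSlot c) else 0) = 0 ∧ pvPC r = 0 := by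
        omega
      refine List.Pairwise.cons ?_ (ih.mp hz.2)
      intro b hb hcontra
      rcases hz with ⟨hz1, _⟩
      rw [if_pos hcontra.1] at hz1
      have hpos : 0 < r.countP (fun x => pvSlot x = pvSlot c) :=
        List.countP_pos_iff.mpr ⟨b, hb, by simp [hcontra.2]⟩
      have hz1' : r.countP (fun x => pvSlot x = pvSlot c) = 0 := by
        simpa [pvOcc] using hz1
      omega
    · intro h
      rcases List.pairwise_cons.mp h with ⟨hhead, htail⟩
      have hz2 : pvPC r = 0 := ih.mpr htail
      simp only [pvPC, hz2, add_zero]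
      split
      · rename_i hw
        have : r.countP (fun x => pvSlot x = pvSlot c) = 0 := by
          rw [List.countP_eq_zero]
          intro b hb
          simpa using fun he => (hhead b hb) ⟨hw, he.symm⟩
        simp [pvOcc, this]
      · rfl

lemma pv_final (line : String) (hpre : Pre_count_palindrome_ways line) :
    count_palindrome_ways line = count_palindrome_ways_alt line + pvPC line.toList := by
  have hchars := pv_pre_forall line hpre
  have hz : ∀ i : Nat, (List.replicate 26 (0 : Int)).getD i 0 = 0 := by
    intro i
    rcases Nat.lt_or_ge i 26 with hi | hi
    · rw [List.getD_eq_getElem _ _ (by simpa using hi)]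
      exact List.getElem_replicate _
    · rw [List.getD_eq_default _ _ (by simpa using hi)]
  obtain ⟨hF26, hFval⟩ := pv_full_loop line.toList hchars (List.replicate 26 (0 : Int)) (by simp)
  -- name A's count array (built by its first loop)
  set F := line.toList.foldl
      (fun (full : List Int) character =>
        PySem.List.pySetD full ((character.toNat : Int) - 97)
          (PySem.List.pyGetD full ((character.toNat : Int) - 97) 0 + 1))
      (List.replicate 26 (0 : Int)) with hFdef
  have hA : count_palindrome_ways line =
      (line.toList.foldl
        (fun (st : List Int × Int) character =>
          let numeric_val : Int := (character.toNat : Int) - 97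
          let left := PySem.List.pySetD st.1 numeric_val
            (PySem.List.pyGetD st.1 numeric_val 0 + 1)
          let pw := (PySem.List.pyRange 0 ((F.length : Int)) 1).foldl
            (fun (acc : Int) i =>
              if i = numeric_val then
                let right := PySem.List.pyGetD F i 0 - PySem.List.pyGetD left i 0
                let cur_left := PySem.List.pyGetD left i 0 - 1
                acc + cur_left * right
              else
                let right := PySem.List.pyGetD F i 0 - PySem.List.pyGetD left i 0
                acc + PySem.List.pyGetD left i 0 * right)
            st.2
          (left, pw)) (List.replicate 26 (0 : Int), (0 : Int))).2 := by
    rfl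
  have hB : count_palindrome_ways_alt line =
      ((PySem.List.enumerate line.toList 0).foldl
        (fun (st : List Int × List Int × Int) kc =>
          let b : Int := ((kc.2.toNat : Int)) - 97
          let total := st.2.2 + PySem.List.pyGetD st.1 b 0 * (kc.1 - 1) - PySem.List.pyGetD st.2.1 b 0
          (PySem.List.pySetD st.1 b (PySem.List.pyGetD st.1 b 0 + 1),
           PySem.List.pySetD st.2.1 b (PySem.List.pyGetD st.2.1 b 0 + kc.1),
           total))
        (List.replicate 26 (0 : Int), List.replicate 26 (0 : Int), 0)).2.2 := rfl
  rw [hA, pv_foldA F hF26 line.toList hchars (List.replicate 26 (0 : Int), (0 : Int)) (by simp)]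
  have hCz : pvC line.toList (List.replicate 26 (0 : Int)) (List.replicate 26 (0 : Int))
      (List.replicate 26 (0 : Int)) 0 = 0 := by
    refine List.sum_eq_zero (fun x hx => ?_)
    simp only [List.mem_map] at hx
    obtain ⟨d, _, rfl⟩ := hx
    show (List.replicate 26 (0:Int)).getD (pvSlot d) 0 * (0 - 1)
        - (List.replicate 26 (0:Int)).getD (pvSlot d) 0
        + (List.replicate 26 (0:Int)).getD (pvSlot d) 0 = 0
    rw [hz]
    ring
  have hacc : (List.replicate 26 (0 : Int), (0 : Int))
      = (List.replicate 26 (0 : Int), 0 + pvC line.toList (List.replicate 26 (0 : Int))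
          (List.replicate 26 (0 : Int)) (List.replicate 26 (0 : Int)) 0) := by
    rw [hCz]
    norm_num
  rw [hacc, pv_main F line.toList hchars (List.replicate 26 (0 : Int))
    (List.replicate 26 (0 : Int)) (List.replicate 26 (0 : Int)) 0 0
    (by simp) (by simp) (by simp)
    (fun i hi => by rw [hFval i hi, hz])]
  rw [hB, pv_foldB line.toList hchars 0
    (List.replicate 26 (0 : Int), List.replicate 26 (0 : Int), 0) (by simp) (by simp)]
  have hP : pvP line.toList (List.replicate 26 (0 : Int)) = pvPC line.toList := by
    rw [pvP_eq line.toList hchars (List.replicate 26 (0 : Int)) (by simp)]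
    have : (line.toList.map (fun d => (List.replicate 26 (0 : Int)).getD (pvSlot d) 0)).sum = 0 := by
      refine List.sum_eq_zero (fun x hx => ?_)
      simp only [List.mem_map] at hx
      obtain ⟨d, _, rfl⟩ := hx
      exact hz (pvSlot d)
    rw [this]
    ring
  rw [hP]

lemma pv_fold_iff (cs : List Char) (hcs : ∀ c ∈ cs, pvSlot c < 26) :
    ∀ (seen : List Bool) (f : Bool), seen.length = 26 →
      ((cs.foldl pvWrapStep (seen, f)).2 = true ↔
        f = true ∨ (∃ c ∈ cs, seen.getD (pvSlot c) false = true) ∨ pvHasWrappedPair cs = true) := by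
  induction cs with
  | nil => intro seen f _; simp [pvHasWrappedPair]
  | cons c r ih =>
    intro seen f hlen
    have hs : pvSlot c < 26 := hcs c (by simp)
    have hr : ∀ d ∈ r, pvSlot d < 26 := fun d hd => hcs d (by simp [hd])
    rw [List.foldl_cons]
    have hst : pvWrapStep (seen, f) c
        = ((if c.toNat ≤ 96 then seen.set (pvSlot c) true else seen),
           f || seen.getD (pvSlot c) false) := rfl
    rw [hst, ih hr _ _ (by split <;> simp [hlen])]
    have hseen' : ∀ d ∈ r,
        ((if c.toNat ≤ 96 then seen.set (pvSlot c) true else seen).getD (pvSlot d) false = true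
          ↔ (c.toNat ≤ 96 ∧ pvSlot d = pvSlot c) ∨ seen.getD (pvSlot d) false = true) := by
      intro d _
      by_cases hw : c.toNat ≤ 96
      · rw [if_pos hw, pv_getD_set' seen (pvSlot c) (pvSlot d) true false (by omega)]
        by_cases hds : pvSlot d = pvSlot c
        · simp [hds, hw]
        · simp [hds]
      · rw [if_neg hw]
        simp [hw]
    have hHWP : (pvHasWrappedPair (c :: r) = true)
        ↔ ((c.toNat ≤ 96 ∧ ∃ d ∈ r, pvSlot d = pvSlot c) ∨ pvHasWrappedPair r = true) := by
      simp [pvHasWrappedPair]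
    rw [hHWP]
    constructor
    · rintro (hf | ⟨d, hd, hsd⟩ | hP)
      · rcases Bool.or_eq_true_iff.mp hf with h | h
        · exact Or.inl h
        · exact Or.inr (Or.inl ⟨c, by simp, h⟩)
      · rcases (hseen' d hd).mp hsd with ⟨hw, hds⟩ | hold
        · exact Or.inr (Or.inr (Or.inl ⟨hw, d, hd, hds⟩))
        · exact Or.inr (Or.inl ⟨d, by simp [hd], hold⟩)
      · exact Or.inr (Or.inr (Or.inr hP))
    · rintro (hf | ⟨d, hd, hsd⟩ | ⟨hw, d, hd, hds⟩ | hP)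
      · exact Or.inl (by simp [hf])
      · rcases List.mem_cons.mp hd with rfl | hd'
        · exact Or.inl (by rw [Bool.or_eq_true]; exact Or.inr hsd)
        · exact Or.inr (Or.inl ⟨d, hd', (hseen' d hd').mpr (Or.inr hsd)⟩)
      · exact Or.inr (Or.inl ⟨d, hd, (hseen' d hd).mpr (Or.inl ⟨hw, hds⟩)⟩)
      · exact Or.inr (Or.inr hP)

lemma pv_HWP_iff (cs : List Char) :
    pvHasWrappedPair cs = true ↔
      ¬ cs.Pairwise (fun a b => ¬ (a.toNat ≤ 96 ∧ pvSlot a = pvSlot b)) := by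
  induction cs with
  | nil => simp [pvHasWrappedPair]
  | cons c r ih =>
    simp only [pvHasWrappedPair, Bool.or_eq_true, Bool.and_eq_true, List.any_eq_true,
      beq_iff_eq, decide_eq_true_eq, ih, List.pairwise_cons]
    constructor
    · rintro (⟨hw, d, hd, hs⟩ | h)
      · exact fun hpair => hpair.1 d hd ⟨hw, hs.symm⟩
      · exact fun hpair => h hpair.2
    · intro h
      by_cases hp : List.Pairwise (fun a b => ¬ (a.toNat ≤ 96 ∧ pvSlot a = pvSlot b)) r
      · left
        by_contra hno
        push Not at hno
        refine h ⟨fun d hd hc => ?_, hp⟩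
        exact hno hc.1 d hd hc.2.symm
      · right
        exact hp

lemma pv_D_iff (line : String) (hpre : Pre_count_palindrome_ways line) :
    D_count_palindrome_ways line ↔
      ¬ line.toList.Pairwise (fun a b => ¬ (a.toNat ≤ 96 ∧ pvSlot a = pvSlot b)) := by
  have hchars := pv_pre_forall line hpre
  have hslots : ∀ c ∈ line.toList, pvSlot c < 26 := fun c hc =>
    pvSlot_lt c (hchars c hc).1 (hchars c hc).2
  unfold D_count_palindrome_ways
  rw [pv_fold_iff line.toList hslots (List.replicate 26 false) false (by simp), ← pv_HWP_iff]
  have hz : ∀ d ∈ line.toList, ¬ ((List.replicate 26 false).getD (pvSlot d) false = true) := by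
    intro d _
    rcases Nat.lt_or_ge (pvSlot d) 26 with hi | hi
    · rw [List.getD_eq_getElem _ _ (by simpa using hi)]
      rw [List.getElem_replicate]
      simp
    · rw [List.getD_eq_default _ _ (by simpa using hi)]
      simp
  constructor
  · rintro (h | ⟨d, hd, hsd⟩ | h)
    · simp at h
    · exact absurd hsd (hz d hd)
    · exact h
  · intro h
    exact Or.inr (Or.inr h)

-- ===== VERDICT (by name: the statement is the Claim_ definition above) =====
theorem count_palindrome_ways_spec : Claim_unchanged_count_palindrome_ways := by
  intro line _ hpre hnD
  rw [pv_final line hpre]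
  have : pvPC line.toList = 0 := by
    rw [pvPC_eq_zero_iff]
    by_contra hc
    exact hnD ((pv_D_iff line hpre).mpr hc)
  rw [this, add_zero]

set_option maxRecDepth 4000 in
theorem count_palindrome_ways_changed : Claim_changed_count_palindrome_ways := by
  unfold Claim_changed_count_palindrome_ways
  refine ⟨by decide, by decide, by decide, by decide, by decide, by decide⟩

theorem count_palindrome_ways_tight : Claim_exact_count_palindrome_ways := by
  intro line _ hpre hD
  rw [pv_final line hpre]
  intro hc
  have hz : pvPC line.toList = 0 := by omega
  exact (pv_D_iff line hpre).mp hD (pvPC_eq_zero_iff _ |>.mp hz)
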